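-- pv_equiv track=rewrite | github.com/theNightosphere/AI_Program3 | prog3.py | get_exps
-- ===== SOURCE A (Python) =====
-- import string
--
-- def get_exps(string_to_parse):
--     '''Parses the string passed to it using a stack. The stack pushes chars
-- until it hits a right parenthesis, it then pops until it reads a left
-- parenthesis. If there are no left parenthesis in the stack once popping is
-- finished, then the term was an expression, and that portion of the string is
-- sliced and appended to the final list of expressions.
--
--     Keyword Arguments:
--     string_to_parse -- A string that has lisp-readable portions. Said portions are sliced and added to a list containing all the valid expressions found in the string
--
--     Returns:
--     list_exps -- A list of strings containing all the valid lisp expressions found within the input string'''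
--
--     paren_stack = []
--     list_exps = []
--     start_i = 0
--     end_i = 0
--     for i in range(len(string_to_parse)):
--         if not string_to_parse[i] in string.whitespace:
--             if not '(' in paren_stack:
--                 start_i = i
--             #Found a right parenthesis, pop until you get a left parenthesis. If the stack is now empty, the right parenthesis was the end of a term.The next term will begin 1 spot later
--             if string_to_parse[i] == ')':
--                 top = paren_stack.pop()
--                 while(top != '(' and len(paren_stack) > 0):
--                     top = paren_stack.pop()
--                 #if the stack has no left parenthesis in it, we've popped off a full term
--                 if not '(' in paren_stack:
--                     end_i = i+1
--                     list_exps.append(string_to_parse[start_i:end_i])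
--             #Not a right parenthesis or the beginning of a term. Append as usual.
--             else:
--                 paren_stack.append(string_to_parse[i])
--     return list_exps
-- ===== SOURCE B (Python) =====
-- import string
--
-- def get_exps(string_to_parse):
--     '''Single pass with an integer open-paren depth counter instead of a
-- character stack: a term starts at the last non-whitespace char seen at
-- depth 0 and ends at the ")" that brings the depth back to 0.'''
--     list_exps = []
--     depth = 0
--     start_i = 0
--     for i, c in enumerate(string_to_parse):
--         if c in string.whitespace:
--             continue
--         if depth == 0:
--             start_i = i
--         if c == '(':
--             depth += 1
--         elif c == ')':
--             depth -= 1
--             if depth == 0: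
--                 list_exps.append(string_to_parse[start_i:i + 1])
--     return list_exps
-- ===== Notes on version B (the rewrite author's own statement) =====
-- stated objective: faster
-- what changed: Replaces A's character stack (a per-character membership scan of the stack for an open paren, plus pop loops) with a single integer open-paren depth counter, turning the parse into one pass with constant work per character.
-- outside the precondition, e.g. on get_exps('a)'): A returns [')'], B returns []; on get_exps(')'): A raises IndexError, B returns []
import Mathlib
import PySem

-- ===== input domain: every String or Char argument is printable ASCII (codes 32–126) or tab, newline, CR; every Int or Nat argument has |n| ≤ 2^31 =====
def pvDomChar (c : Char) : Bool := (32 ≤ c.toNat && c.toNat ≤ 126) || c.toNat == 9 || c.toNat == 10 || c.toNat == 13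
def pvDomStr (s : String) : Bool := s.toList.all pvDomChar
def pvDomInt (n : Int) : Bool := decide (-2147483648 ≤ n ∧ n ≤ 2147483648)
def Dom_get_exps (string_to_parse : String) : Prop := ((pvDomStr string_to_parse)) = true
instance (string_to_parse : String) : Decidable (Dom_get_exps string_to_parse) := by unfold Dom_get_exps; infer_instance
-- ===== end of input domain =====

-- B replaces A's character stack (with its per-character membership scans of the stack and pop
-- loops) by a single integer open-paren depth counter: one pass, constant work per character.

-- membership in Python's string.whitespace = ' \t\n\r\x0b\x0c' (both sources test it)
def inStringWhitespace (c : Char) : Bool :=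
  c = ' ' || c = '\t' || c = '\n' || c = '\r' || c = '\x0b' || c = '\x0c'

-- ===== PORT A =====
-- A's inner while loop: top = paren_stack.pop(); while top != '(' and len(paren_stack) > 0: top = paren_stack.pop()
def popLoop (top : Char) (st : List Char) : List Char :=
  if top = '(' then st
  else
    match st with
    | [] => []
    | t :: rest => popLoop t rest

-- A's for-loop over range(len(s)): state = (paren_stack, list_exps, start_i, end_i); list head = stack top
def goA (full : List Char) : List Char → Nat → List Char → List String → Nat → Nat → List String
  | [], _, _, exps, _, _ => exps
  | c :: cs, i, stack, exps, start, endi =>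
    if inStringWhitespace c then goA full cs (i+1) stack exps start endi
    else
      let start' := if '(' ∈ stack then start else i
      if c = ')' then
        match stack with
        | [] => goA full cs (i+1) [] exps start' endi   -- Python raises IndexError here; excluded by Pre_
        | t :: rest =>
          let st' := popLoop t rest
          if '(' ∈ st' then goA full cs (i+1) st' exps start' endi
          else goA full cs (i+1) st'
                 (exps ++ [String.ofList (PySem.List.slice full (some ((start' : Int))) (some ((i : Int) + 1)))])
                 start' (i+1)
      else goA full cs (i+1) (c :: stack) exps start' endi

def get_exps (string_to_parse : String) : List String :=
  goA string_to_parse.toList string_to_parse.toList 0 [] [] 0 0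

-- ===== PORT B =====
-- B's single pass: state = (depth, list_exps, start_i)
def goB (full : List Char) : List Char → Nat → Int → List String → Nat → List String
  | [], _, _, exps, _ => exps
  | c :: cs, i, d, exps, start =>
    if inStringWhitespace c then goB full cs (i+1) d exps start
    else
      let start' := if d = 0 then i else start
      if c = '(' then goB full cs (i+1) (d+1) exps start'
      else if c = ')' then
        if d - 1 = 0 then
          goB full cs (i+1) (d-1)
            (exps ++ [String.ofList (PySem.List.slice full (some ((start' : Int))) (some ((i : Int) + 1)))])
            start'
        else goB full cs (i+1) (d-1) exps start'
      else goB full cs (i+1) d exps start'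

def get_exps_alt (string_to_parse : String) : List String :=
  goB string_to_parse.toList string_to_parse.toList 0 0 [] 0

-- ===== PRECONDITION & SPEC =====
-- Pre_ excludes strings with an unmatched closing paren (one preceded by no more opening than
-- closing parens): there A either raises IndexError (pop from an empty stack) or, when stray earlier
-- text keeps the stack non-empty, returns a bare closing paren as an expression — an artifact of its
-- stack emptying.
def Pre_get_exps (string_to_parse : String) : Prop :=
  ∀ i : Nat, (h : i < string_to_parse.toList.length) → string_to_parse.toList[i] = ')' →
    (string_to_parse.toList.take i).count ')' < (string_to_parse.toList.take i).count '('
instance (string_to_parse : String) : Decidable (Pre_get_exps string_to_parse) := by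
  unfold Pre_get_exps; infer_instance

def pvWitness_get_exps : String := "(+ 1 2) (f (g x))"

def Spec_get_exps (string_to_parse : String) (out : List String) : Prop := out = get_exps_alt string_to_parse
instance (string_to_parse : String) (out : List String) : Decidable (Spec_get_exps string_to_parse out) := by unfold Spec_get_exps; infer_instance

-- ===== CLAIM (what is proved, stated in full; the proofs are below) =====
def Claim_equal_get_exps : Prop := ∀ (string_to_parse : String), Dom_get_exps string_to_parse → Pre_get_exps string_to_parse → Spec_get_exps string_to_parse (get_exps string_to_parse)

-- ===== LEMMAS AND PROOFS =====

-- prefix-balance invariant threaded through the loop: every ')' in cs sees a positive running depth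
def Ok : Int → List Char → Prop
  | _, [] => True
  | d, c :: cs => if c = '(' then Ok (d+1) cs else if c = ')' then 0 < d ∧ Ok (d-1) cs else Ok d cs

-- popping to the nearest '(' removes exactly one '(' from A's stack
lemma popLoop_count (top : Char) (st : List Char) (h : 0 < (top :: st).count '(') :
    (popLoop top st).count '(' + 1 = (top :: st).count '(' := by
  induction st generalizing top with
  | nil =>
    unfold popLoop
    rcases eq_or_ne top '(' with rfl | hne
    · simp
    · simp [hne] at h
  | cons t rest ih =>
    unfold popLoop
    rcases eq_or_ne top '(' with rfl | hne
    · simp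
    · simp only [if_neg hne]
      have := ih t (by simpa [List.count_cons, hne] using h)
      simpa [List.count_cons, hne] using this

-- Pre_'s prefix-count condition implies the threaded invariant
lemma ok_of_pre (cs : List Char) (d : Int)
    (h : ∀ i : Nat, (hi : i < cs.length) → cs[i] = ')' →
      ((cs.take i).count ')' : Int) - (cs.take i).count '(' < d) : Ok d cs := by
  induction cs generalizing d with
  | nil => trivial
  | cons c cs ih =>
    have hnext : ∀ dc : Int,
        (∀ i : Nat, ((c :: cs).take (i+1)).count ')' - (((c :: cs).take (i+1)).count '(' : Int)
          = ((cs.take i).count ')' : Int) - (cs.take i).count '(' - dc) →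
        (∀ i : Nat, (hi : i < cs.length) → cs[i] = ')' →
          ((cs.take i).count ')' : Int) - (cs.take i).count '(' < d + dc) := by
      intro dc hcnt i hi hci
      have := h (i+1) (by simpa using hi) (by simpa using hci)
      have := hcnt i
      omega
    rcases eq_or_ne c ')' with rfl | hnc
    · have h0 : (0 : Int) < d := by simpa using h 0 (by simp) rfl
      suffices hh : 0 < d ∧ Ok (d-1) cs by simpa [Ok] using hh
      refine ⟨h0, ih _ ?_⟩
      have := hnext (-1) (by intro i; simp; omega)
      intro i hi hci; have := this i hi hci; omega
    rcases eq_or_ne c '(' with rfl | hno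
    · suffices hh : Ok (d+1) cs by simpa [Ok] using hh
      exact ih _ (hnext 1 (by intro i; simp; omega))
    · suffices hh : Ok d cs by simpa [Ok, hno, hnc] using hh
      exact ih _ (by simpa using hnext 0 (by intro i; simp [hno, hnc]))

-- main loop correspondence: A's stack is summarized by its '(' count (= B's depth)
lemma goA_eq_goB (full : List Char) (cs : List Char) :
    ∀ (i : Nat) (stack : List Char) (exps : List String) (start endi : Nat) (d : Int),
      d = (stack.count '(' : Int) → Ok d cs →
      goA full cs i stack exps start endi = goB full cs i d exps start := by
  induction cs with
  | nil => intro _ _ _ _ _ _ _ _; rfl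
  | cons c cs ih =>
    intro i stack exps start endi d hd hok
    by_cases hws : inStringWhitespace c
    · rw [show goA full (c::cs) i stack exps start endi = goA full cs (i+1) stack exps start endi
           from by simp [goA, hws],
          show goB full (c::cs) i d exps start = goB full cs (i+1) d exps start
           from by simp [goB, hws]]
      have hc1 : c ≠ '(' := by rintro rfl; simp [inStringWhitespace] at hws
      have hc2 : c ≠ ')' := by rintro rfl; simp [inStringWhitespace] at hws
      exact ih _ _ _ _ _ _ hd (by simpa [Ok, hc1, hc2] using hok)
    have hmem : ('(' ∈ stack) ↔ ¬ (d = 0) := by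
      rw [hd]; rw [← List.count_pos_iff]; omega
    have hstart : (if '(' ∈ stack then start else i) = (if d = 0 then i else start) := by
      by_cases h0 : d = 0
      · rw [if_neg (by rw [hmem]; simp [h0]), if_pos h0]
      · rw [if_pos (hmem.mpr h0), if_neg h0]
    rcases eq_or_ne c ')' with rfl | hnc
    · simp [Ok] at hok
      obtain ⟨hdpos, hok⟩ := hok
      have hcnt : 0 < stack.count '(' := by omega
      obtain ⟨t, rest, rfl⟩ : ∃ t rest, stack = t :: rest := by
        cases stack with
        | nil => simp at hcnt
        | cons t rest => exact ⟨t, rest, rfl⟩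
      have hpop := popLoop_count t rest hcnt
      have hd' : d - 1 = ((popLoop t rest).count '(' : Int) := by omega
      have hmem' : ('(' ∈ popLoop t rest) ↔ ¬ (d - 1 = 0) := by
        rw [hd']; rw [← List.count_pos_iff]; omega
      simp only [goA, goB, if_neg hws, hstart]
      norm_num
      by_cases h1 : d - 1 = 0
      · rw [if_neg (by rw [hmem']; simp [h1]), if_pos h1]
        exact ih _ _ _ _ _ _ hd' hok
      · rw [if_pos (hmem'.mpr h1), if_neg h1]
        exact ih _ _ _ _ _ _ hd' hok
    rcases eq_or_ne c '(' with rfl | hno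
    · simp [Ok] at hok
      simp only [goA, goB, if_neg hws, hstart]
      norm_num
      exact ih _ _ _ _ _ _ (by simp; omega) hok
    · simp only [Ok, if_neg hno, if_neg hnc] at hok
      simp only [goA, goB, if_neg hws, hstart, if_neg hno, if_neg hnc]
      exact ih _ _ _ _ _ _ (by simp [hno]; omega) hok

-- ===== VERDICT (by name: the statement is the Claim_ definition above) =====
theorem get_exps_spec : Claim_equal_get_exps := by
  intro s _ hpre
  unfold Spec_get_exps get_exps get_exps_alt
  apply goA_eq_goB
  · simp
  · apply ok_of_pre
    intro i hi hci
    have := hpre i hi hci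
    omega
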